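-- pv_equiv track=rewrite | github.com/whym1here/basic-dsalgo | dsa/10/code.py | slow_sol
-- ===== SOURCE A (Python) =====
-- def slow_sol(n : int, k : int) -> int:
--     dp = [0 for i in range(n+1)]
--     dp[0] = 1
--
--     for i in range(1, n+1):
--         for j in range(1, k+1):
--             if (i-j >= 0):
--                 dp[i] += dp[i-j]
--             else:
--                 break
--
--     return dp[n]
-- ===== SOURCE B (Python) =====
-- def slow_sol(n: int, k: int) -> int:
--     # Sliding-window DP: keep a running sum of the last k values, O(n) instead of O(n*k).
--     if k <= 0:
--         return 1 if n == 0 else 0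
--     dp = [1]
--     window = 0  # sum of the last min(i, k) entries of dp
--     for i in range(1, n + 1):
--         window += dp[i - 1]
--         if i - k - 1 >= 0:
--             window -= dp[i - k - 1]
--         dp.append(window)
--     return dp[n]
-- ===== Notes on version B (the rewrite author's own statement) =====
-- stated objective: faster
-- what changed: A recomputes each dp[i] by summing up to k previous entries in an inner loop; B keeps a sliding-window running sum (add the newest entry, subtract the one leaving the window), removing the inner loop entirely.
import Mathlib
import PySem

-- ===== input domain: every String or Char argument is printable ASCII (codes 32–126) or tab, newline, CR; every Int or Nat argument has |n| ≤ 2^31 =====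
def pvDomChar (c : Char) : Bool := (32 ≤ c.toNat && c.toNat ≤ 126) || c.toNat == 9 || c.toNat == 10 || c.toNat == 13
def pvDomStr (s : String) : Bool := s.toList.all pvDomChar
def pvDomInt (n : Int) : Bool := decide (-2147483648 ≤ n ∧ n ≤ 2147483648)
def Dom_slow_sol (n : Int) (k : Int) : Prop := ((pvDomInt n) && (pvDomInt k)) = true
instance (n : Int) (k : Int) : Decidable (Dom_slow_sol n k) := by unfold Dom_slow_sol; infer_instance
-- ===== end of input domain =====

-- B replaces A's O(n*k) re-summation of up to k previous dp entries per cell by an O(n)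
-- sliding-window running sum (add the newest entry, drop the one that left the window).

-- ===== PORT A =====
-- inner loop 'for j in range(1, k+1): if i-j >= 0: dp[i] += dp[i-j] else: break'
-- (fuel = number of iterations of range(1, k+1) = k.toNat; 'else' branch is the break)
def slowInner (dp : List Int) (i : Int) (j : Int) : Nat → List Int
  | 0 => dp
  | f + 1 =>
    if i - j ≥ 0 then
      slowInner (PySem.List.pySetD dp i (PySem.List.pyGetD dp i 0 + PySem.List.pyGetD dp (i - j) 0))
        i (j + 1) f
    else dp

def slow_sol (n : Int) (k : Int) : Int :=
  -- dp = [0]*(n+1); dp[0] = 1   (IndexError when n < 0: excluded by Pre_)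
  let dp := PySem.List.pySetD (List.replicate (n + 1).toNat (0 : Int)) 0 1
  let dp := (PySem.List.pyRange 1 (n + 1) 1).foldl (fun d i => slowInner d i 1 k.toNat) dp
  PySem.List.pyGetD dp n 0

-- ===== PORT B =====
def slow_sol_alt (n : Int) (k : Int) : Int :=
  if k ≤ 0 then (if n = 0 then 1 else 0)
  else
    let st := (PySem.List.pyRange 1 (n + 1) 1).foldl
      (fun (st : List Int × Int) i =>
        let w := st.2 + PySem.List.pyGetD st.1 (i - 1) 0
        let w := if i - k - 1 ≥ 0 then w - PySem.List.pyGetD st.1 (i - k - 1) 0 else w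
        (st.1 ++ [w], w)) ([1], 0)
    PySem.List.pyGetD st.1 n 0

-- ===== PRECONDITION & SPEC =====
-- A raises IndexError at 'dp[0] = 1' when n < 0 (dp is then empty); excluded.
def Pre_slow_sol (n : Int) (k : Int) : Prop := 0 ≤ n
instance (n : Int) (k : Int) : Decidable (Pre_slow_sol n k) := by unfold Pre_slow_sol; infer_instance
def pvWitness_slow_sol : Int × Int := (5, 3)

def Spec_slow_sol (n : Int) (k : Int) (out : Int) : Prop := out = slow_sol_alt n k
instance (n : Int) (k : Int) (out : Int) : Decidable (Spec_slow_sol n k out) := by unfold Spec_slow_sol; infer_instance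

-- ===== CLAIM (what is proved, stated in full; the proofs are below) =====
def Claim_equal_slow_sol : Prop := ∀ (n : Int) (k : Int), Dom_slow_sol n k → Pre_slow_sol n k → Spec_slow_sol n k (slow_sol n k)

-- ===== LEMMAS AND PROOFS =====

-- Reference table: winList K m = [c 0, …, c m] where c i is the number of compositions
-- of i into parts 1..K; each new entry is the sum of the (at most K) previous entries.
def winList (K : Nat) : Nat → List Int
  | 0 => [1]
  | m + 1 => winList K m ++ [((winList K m).drop (m + 1 - K)).sum]

lemma length_winList (K m : Nat) : (winList K m).length = m + 1 := by
  induction m with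
  | zero => rfl
  | succ m ih => simp [winList, ih]

-- A's inner loop: it adds Σ_{j₀ ≤ j < j₀+f, j ≤ i} dp[i-j] to dp[i].
lemma slowInner_spec (f : Nat) (dp : List Int) (i : Nat) (hi : i < dp.length) (j₀ : Nat) (hj : 1 ≤ j₀) :
    slowInner dp (i : Int) (j₀ : Int) f =
      dp.set i (dp.getD i 0 + ∑ t ∈ Finset.range f, if j₀ + t ≤ i then dp.getD (i - (j₀ + t)) 0 else 0) := by
  induction f generalizing dp j₀ with
  | zero =>
    simp only [slowInner, Finset.range_zero, Finset.sum_empty, add_zero]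
    rw [List.getD_eq_getElem dp 0 hi]
    exact (List.set_getElem_self hi).symm
  | succ f ih =>
    simp only [slowInner]
    by_cases h : j₀ ≤ i
    · have hge : (i : Int) - (j₀ : Int) ≥ 0 := by omega
      rw [if_pos hge]
      have hc1 : (i : Int) - (j₀ : Int) = ((i - j₀ : Nat) : Int) := by omega
      have hc2 : (j₀ : Int) + 1 = ((j₀ + 1 : Nat) : Int) := by push_cast; ring
      rw [hc1, hc2, PySem.List.pySetD_natCast, PySem.List.pyGetD_natCast, PySem.List.pyGetD_natCast]
      rw [ih (dp.set i (dp.getD i 0 + dp.getD (i - j₀) 0)) (by simpa using hi) (j₀ + 1) (by omega)]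
      rw [List.set_set]
      have hgi : (dp.set i (dp.getD i 0 + dp.getD (i - j₀) 0)).getD i 0
          = dp.getD i 0 + dp.getD (i - j₀) 0 := by
        simp [List.getD, hi]
      have hsum : (∑ t ∈ Finset.range f, if j₀ + 1 + t ≤ i then
            (dp.set i (dp.getD i 0 + dp.getD (i - j₀) 0)).getD (i - (j₀ + 1 + t)) 0 else 0)
          = ∑ t ∈ Finset.range f, if j₀ + (t + 1) ≤ i then dp.getD (i - (j₀ + (t + 1))) 0 else 0 := by
        refine Finset.sum_congr rfl (fun t _ => ?_)
        have he : j₀ + 1 + t = j₀ + (t + 1) := by omega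
        rw [he]
        by_cases hle : j₀ + (t + 1) ≤ i
        · rw [if_pos hle, if_pos hle]
          have hne : i - (j₀ + (t + 1)) ≠ i := by omega
          simp [List.getD, List.getElem?_set_ne (fun e => hne e.symm)]
        · rw [if_neg hle, if_neg hle]
      rw [hgi, hsum, Finset.sum_range_succ']
      simp only [Nat.add_zero]
      rw [if_pos h]
      congr 1
      ring
    · have hlt : ¬ ((i : Int) - (j₀ : Int) ≥ 0) := by omega
      rw [if_neg hlt]
      have hz : (∑ t ∈ Finset.range (f + 1), if j₀ + t ≤ i then dp.getD (i - (j₀ + t)) 0 else 0) = 0 := by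
        refine Finset.sum_eq_zero (fun t _ => ?_)
        rw [if_neg (by omega)]
      rw [hz, add_zero, List.getD_eq_getElem dp 0 hi]
      exact (List.set_getElem_self hi).symm

-- window sum: Σ_{1 ≤ j ≤ K, j ≤ len l} l[len l - j] = sum of the last K entries of l
lemma sum_window (l : List Int) (K : Nat) :
    (∑ t ∈ Finset.range K, if 1 + t ≤ l.length then l.getD (l.length - (1 + t)) 0 else 0)
      = (l.drop (l.length - K)).sum := by
  induction K with
  | zero => simp
  | succ K ih =>
    rw [Finset.sum_range_succ, ih]
    by_cases h : 1 + K ≤ l.length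
    · rw [if_pos h]
      have h1 : l.length - (K + 1) < l.length := by omega
      rw [show l.length - (K + 1) = l.length - (1 + K) from by omega] at h1
      rw [show l.length - (K + 1) = l.length - (1 + K) from by omega,
        List.drop_eq_getElem_cons h1, List.sum_cons,
        List.getD_eq_getElem l 0 h1, show l.length - (1 + K) + 1 = l.length - K from by omega]
      ring
    · rw [if_neg h, show l.length - (K + 1) = l.length - K from by omega, add_zero]

-- A's outer loop invariant
lemma slowA_loop (k : Int) (N m : Nat) (hm : m ≤ N) :
    (PySem.List.pyRange 1 ((m : Int) + 1) 1).foldl (fun d i => slowInner d i 1 k.toNat)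
        ((1 : Int) :: List.replicate N 0)
      = winList k.toNat m ++ List.replicate (N - m) 0 := by
  induction m with
  | zero =>
    rw [show ((0 : Nat) : Int) + 1 = 1 from by norm_num, PySem.List.pyRange_one_eq_nil (le_refl 1)]
    simp [winList]
  | succ m ih =>
    have hm' : m ≤ N := by omega
    have hsplit : PySem.List.pyRange 1 (((m : Int) + 1) + 1) 1
        = PySem.List.pyRange 1 ((m : Int) + 1) 1 ++ [(m : Int) + 1] :=
      PySem.List.pyRange_one_succ_right (by omega)
    rw [show (((m + 1 : Nat)) : Int) + 1 = ((m : Int) + 1) + 1 from by push_cast; ring,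
      hsplit, List.foldl_append, ih hm']
    simp only [List.foldl_cons, List.foldl_nil]
    have hlen : (winList k.toNat m ++ List.replicate (N - m) 0).length = N + 1 := by
      simp [length_winList]; omega
    rw [show (m : Int) + 1 = ((m + 1 : Nat) : Int) from by push_cast; ring,
      show (1 : Int) = ((1 : Nat) : Int) from rfl,
      slowInner_spec k.toNat _ (m + 1) (by omega) 1 (le_refl 1)]
    set w := winList k.toNat m with hw
    have hwl : w.length = m + 1 := length_winList _ _
    have hrep : List.replicate (N - m) (0 : Int) = 0 :: List.replicate (N - (m + 1)) 0 := by
      rw [show N - m = (N - (m + 1)) + 1 from by omega, List.replicate_succ]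
    have hg0 : (w ++ List.replicate (N - m) (0 : Int)).getD (m + 1) 0 = 0 := by
      rw [hrep]
      simp [List.getD, hwl]
    have hsum : (∑ t ∈ Finset.range k.toNat, if 1 + t ≤ m + 1 then
          (w ++ List.replicate (N - m) (0 : Int)).getD (m + 1 - (1 + t)) 0 else 0)
        = (w.drop (m + 1 - k.toNat)).sum := by
      have : ∀ t ∈ Finset.range k.toNat, (if 1 + t ≤ m + 1 then
            (w ++ List.replicate (N - m) (0 : Int)).getD (m + 1 - (1 + t)) 0 else 0)
          = (if 1 + t ≤ w.length then w.getD (w.length - (1 + t)) 0 else 0) := by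
        intro t _
        rw [hwl]
        by_cases hle : 1 + t ≤ m + 1
        · rw [if_pos hle, if_pos hle]
          simp [List.getD, List.getElem?_append_left (by omega : m + 1 - (1 + t) < w.length) ]
        · rw [if_neg hle, if_neg hle]
      rw [Finset.sum_congr rfl this, sum_window, hwl]
    rw [hg0, hsum, zero_add, hrep]
    rw [show m + 1 = w.length + 0 from by omega, List.set_append_right _ _ (by omega)]
    simp only [show w.length + 0 - w.length = 0 from by omega, List.set_cons_zero]
    rw [show w.length + 0 = m + 1 from by omega]
    rw [show winList k.toNat (m + 1) = w ++ [(w.drop (m + 1 - k.toNat)).sum] from rfl,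
      List.append_cons]

-- sliding-window arithmetic: one step of B's window update
lemma window_step (l : List Int) (m K : Nat) (hl : l.length = m + 1) (hK : 1 ≤ K) :
    (l.dropLast.drop (m - K)).sum + l.getD m 0 - (if K ≤ m then l.getD (m - K) 0 else 0)
      = (l.drop (m + 1 - K)).sum := by
  have hne : l ≠ [] := by intro e; rw [e] at hl; simp at hl
  obtain ⟨t, x, rfl⟩ : ∃ t x, l = t ++ [x] :=
    ⟨l.dropLast, l.getLast hne, (List.dropLast_append_getLast hne).symm⟩
  have ht : t.length = m := by simpa using hl
  rw [List.dropLast_concat]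
  have hgm : (t ++ [x]).getD m 0 = x := by
    simp [List.getD, ht]
  have hdrop : (t ++ [x]).drop (m + 1 - K) = t.drop (m + 1 - K) ++ [x] :=
    List.drop_append_of_le_length (by omega)
  rw [hgm, hdrop, List.sum_append, List.sum_cons, List.sum_nil]
  by_cases hK : K ≤ m
  · rw [if_pos hK]
    have hgk : (t ++ [x]).getD (m - K) 0 = t.getD (m - K) 0 := by
      simp [List.getD, List.getElem?_append_left (by omega : m - K < t.length)]
    have h1 : m - K < t.length := by omega
    rw [hgk, List.drop_eq_getElem_cons h1, List.sum_cons,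
      List.getD_eq_getElem t 0 h1, show m - K + 1 = m + 1 - K from by omega]
    ring
  · rw [if_neg hK, show m - K = 0 from by omega, show m + 1 - K = 0 from by omega]
    ring

-- B's loop invariant (k ≥ 1)
lemma slowB_loop (k : Int) (hk : 1 ≤ k) (m : Nat) :
    (PySem.List.pyRange 1 ((m : Int) + 1) 1).foldl
        (fun (st : List Int × Int) i =>
          let w := st.2 + PySem.List.pyGetD st.1 (i - 1) 0
          let w := if i - k - 1 ≥ 0 then w - PySem.List.pyGetD st.1 (i - k - 1) 0 else w
          (st.1 ++ [w], w)) ([1], 0)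
      = (winList k.toNat m, ((winList k.toNat m).dropLast.drop (m - k.toNat)).sum) := by
  induction m with
  | zero =>
    rw [show ((0 : Nat) : Int) + 1 = 1 from by norm_num, PySem.List.pyRange_one_eq_nil (le_refl 1)]
    simp [winList]
  | succ m ih =>
    have hsplit : PySem.List.pyRange 1 (((m : Int) + 1) + 1) 1
        = PySem.List.pyRange 1 ((m : Int) + 1) 1 ++ [(m : Int) + 1] :=
      PySem.List.pyRange_one_succ_right (by omega)
    rw [show (((m + 1 : Nat)) : Int) + 1 = ((m : Int) + 1) + 1 from by push_cast; ring,
      hsplit, List.foldl_append, ih]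
    simp only [List.foldl_cons, List.foldl_nil]
    set K := k.toNat with hK
    set w := winList K m with hw
    have hwl : w.length = m + 1 := length_winList _ _
    have hg1 : PySem.List.pyGetD w ((m : Int) + 1 - 1) 0 = w.getD m 0 := by
      rw [show (m : Int) + 1 - 1 = ((m : Nat) : Int) from by ring, PySem.List.pyGetD_natCast]
    have hkK : (k : Int) = (K : Int) := by omega
    have hval : (if (m : Int) + 1 - k - 1 ≥ 0 then
          ((w.dropLast.drop (m - K)).sum + w.getD m 0) - PySem.List.pyGetD w ((m : Int) + 1 - k - 1) 0
        else (w.dropLast.drop (m - K)).sum + w.getD m 0)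
        = (w.drop (m + 1 - K)).sum := by
      by_cases hc : K ≤ m
      · rw [if_pos (by omega)]
        rw [show (m : Int) + 1 - k - 1 = ((m - K : Nat) : Int) from by omega,
          PySem.List.pyGetD_natCast]
        rw [← window_step w m K hwl (by omega), if_pos hc]
      · rw [if_neg (by omega)]
        rw [← window_step w m K hwl (by omega), if_neg hc]
        ring
    simp only [hg1]
    rw [hval]
    rw [show winList K (m + 1) = w ++ [(w.drop (m + 1 - K)).sum] from rfl,
      List.dropLast_concat]

lemma winList_zero_getD (m : Nat) : (winList 0 m).getD m 0 = if m = 0 then 1 else 0 := by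
  cases m with
  | zero => rfl
  | succ m =>
    rw [winList]
    have hwl : (winList 0 m).length = m + 1 := length_winList _ _
    rw [show m + 1 - 0 = m + 1 from rfl, List.drop_eq_nil_of_le (by omega), List.sum_nil]
    simp [List.getD, hwl]

lemma slow_sol_eq_winList (n k : Int) (hn : 0 ≤ n) :
    slow_sol n k = (winList k.toNat n.toNat).getD n.toNat 0 := by
  obtain ⟨N, rfl⟩ : ∃ N : Nat, n = (N : Int) := ⟨n.toNat, (Int.toNat_of_nonneg hn).symm⟩
  simp only [slow_sol]
  rw [show ((N : Int) + 1).toNat = N + 1 from by omega, List.replicate_succ,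
    PySem.List.pySetD_of_nonneg, show ((0 : Int)).toNat = 0 from rfl, List.set_cons_zero,
    slowA_loop k N N (le_refl N), Nat.sub_self, List.replicate_zero,
    List.append_nil, PySem.List.pyGetD_natCast, Int.toNat_natCast]
  exact le_refl 0

-- ===== VERDICT (by name: the statement is the Claim_ definition above) =====
theorem slow_sol_spec : Claim_equal_slow_sol := by
  intro n k _ hn
  replace hn : 0 ≤ n := hn
  unfold Spec_slow_sol slow_sol_alt
  rw [slow_sol_eq_winList n k hn]
  by_cases hk : k ≤ 0
  · rw [if_pos hk, show k.toNat = 0 from by omega, winList_zero_getD]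
    by_cases h0 : n = 0
    · rw [if_pos h0, if_pos (by omega)]
    · rw [if_neg h0, if_neg (by omega)]
  · rw [if_neg hk]
    obtain ⟨N, rfl⟩ : ∃ N : Nat, n = (N : Int) := ⟨n.toNat, (Int.toNat_of_nonneg hn).symm⟩
    rw [slowB_loop k (by omega) N]
    rw [PySem.List.pyGetD_natCast, Int.toNat_natCast]
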